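-- pv_equiv track=rewrite | github.com/nnyyt/ABA_Project_Ver2 | backend/scripts/pyarg_runner.py | get_accepted_assumptions
-- ===== SOURCE A (Python) =====
-- def get_accepted_assumptions(extensions, strategy_specification: str):
--     ext_list = list(extensions or [])
--     if not ext_list:
--         return frozenset()
--
--     if strategy_specification == "Skeptical":
--         common = set(ext_list[0])
--         for ext in ext_list[1:]:
--             common.intersection_update(ext)
--         return frozenset(common)
--
--     if strategy_specification == "Credulous":
--         merged = set()
--         for ext in ext_list:
--             merged.update(ext)
--         return frozenset(merged)
--
--     raise ValueError("strategy_specification must be 'Skeptical' or 'Credulous'")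
-- ===== SOURCE B (Python) =====
-- def get_accepted_assumptions(extensions, strategy_specification: str):
--     ext_list = list(extensions or [])
--     if not ext_list:
--         return frozenset()
--
--     if strategy_specification not in ("Skeptical", "Credulous"):
--         raise ValueError("strategy_specification must be 'Skeptical' or 'Credulous'")
--
--     # One counting pass: how many extensions contain each assumption.
--     counts = {}
--     for ext in ext_list:
--         for a in set(ext):  # dedupe within an extension so it counts at most once
--             counts[a] = counts.get(a, 0) + 1
--
--     if strategy_specification == "Skeptical":
--         n = len(ext_list)
--         return frozenset(a for a, c in counts.items() if c == n)
--     return frozenset(counts)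
-- ===== Notes on version B (the rewrite author's own statement) =====
-- stated objective: alternative
-- what changed: Replaces the two per-strategy set-accumulator loops (iterated intersection_update / update) by a single counting pass that records in how many extensions each assumption occurs, then filters: count == n for Skeptical, all keys for Credulous.
import Mathlib
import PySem

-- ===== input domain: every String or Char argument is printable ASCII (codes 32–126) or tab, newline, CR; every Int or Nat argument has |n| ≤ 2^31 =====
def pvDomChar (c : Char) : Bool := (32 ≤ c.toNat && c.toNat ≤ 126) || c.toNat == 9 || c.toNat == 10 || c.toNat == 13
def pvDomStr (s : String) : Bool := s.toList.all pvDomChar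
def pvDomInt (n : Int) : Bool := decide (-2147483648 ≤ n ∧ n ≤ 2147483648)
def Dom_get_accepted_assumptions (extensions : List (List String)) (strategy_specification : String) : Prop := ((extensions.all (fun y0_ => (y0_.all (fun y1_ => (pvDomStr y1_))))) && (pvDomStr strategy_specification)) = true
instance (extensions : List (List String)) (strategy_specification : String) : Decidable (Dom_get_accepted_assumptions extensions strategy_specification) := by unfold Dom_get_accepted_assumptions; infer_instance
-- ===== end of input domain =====

-- B replaces the two per-strategy set-accumulator loops by one membership-counting pass
-- (a dict counting in how many extensions each assumption occurs) plus a filter (objective: alternative).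
-- Both return frozensets; equality of the ports is on the canonical first-insertion order both produce.

-- ===== PORT A =====
def get_accepted_assumptions (extensions : List (List String)) (strategy_specification : String) : List String :=
  let ext_list := extensions
  if ext_list = [] then []
  else if strategy_specification == "Skeptical" then
    match ext_list with
    | [] => []
    | e0 :: rest => rest.foldl (fun common ext => PySem.Set.inter common ext) (PySem.Set.ofList e0)
  else if strategy_specification == "Credulous" then
    extensions.foldl (fun merged ext => PySem.Set.update merged ext) PySem.Set.empty
  else []  -- Python raises ValueError here; excluded by Pre_

-- ===== PORT B =====
def get_accepted_assumptions_alt (extensions : List (List String)) (strategy_specification : String) : List String :=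
  if extensions = [] then []
  else if !(strategy_specification == "Skeptical" || strategy_specification == "Credulous") then
    []  -- Python raises ValueError here; excluded by Pre_
  else
    let counts := extensions.foldl
      (fun d ext => (PySem.Set.ofList ext).foldl (fun d a => d.insert a (d.getD a 0 + 1)) d)
      PySem.Dict.empty
    if strategy_specification == "Skeptical" then
      let n : Int := extensions.length
      (counts.items.filter (fun p => p.2 == n)).map (fun p => p.1)
    else
      counts.keys

-- ===== PRECONDITION & SPEC =====
-- Pre_ excludes exactly the inputs where A raises ValueError: a nonempty extension list with an unknown strategy.
def Pre_get_accepted_assumptions (extensions : List (List String)) (strategy_specification : String) : Prop :=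
  extensions = [] ∨ strategy_specification = "Skeptical" ∨ strategy_specification = "Credulous"
instance (extensions : List (List String)) (strategy_specification : String) : Decidable (Pre_get_accepted_assumptions extensions strategy_specification) := by unfold Pre_get_accepted_assumptions; infer_instance
def pvWitness_get_accepted_assumptions : List (List String) × String := ([["a", "b"], ["b", "c"]], "Skeptical")

def Spec_get_accepted_assumptions (extensions : List (List String)) (strategy_specification : String) (out : List String) : Prop := out = get_accepted_assumptions_alt extensions strategy_specification
instance (extensions : List (List String)) (strategy_specification : String) (out : List String) : Decidable (Spec_get_accepted_assumptions extensions strategy_specification out) := by unfold Spec_get_accepted_assumptions; infer_instance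

-- ===== CLAIM (what is proved, stated in full; the proofs are below) =====
def Claim_equal_get_accepted_assumptions : Prop := ∀ (extensions : List (List String)) (strategy_specification : String), Dom_get_accepted_assumptions extensions strategy_specification → Pre_get_accepted_assumptions extensions strategy_specification → Spec_get_accepted_assumptions extensions strategy_specification (get_accepted_assumptions extensions strategy_specification)

-- ===== LEMMAS AND PROOFS =====

-- number of extensions containing k
def pvHits (k : String) (exts : List (List String)) : Nat :=
  (exts.map (fun e => if k ∈ e then 1 else 0)).sum

theorem pvHits_le (k : String) (exts : List (List String)) : pvHits k exts ≤ exts.length := by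
  induction exts with
  | nil => simp [pvHits]
  | cons e l ih =>
    simp only [pvHits, List.map_cons, List.sum_cons, List.length_cons] at *
    split <;> omega

theorem pvHits_eq_length_iff (k : String) (exts : List (List String)) :
    pvHits k exts = exts.length ↔ ∀ e ∈ exts, k ∈ e := by
  induction exts with
  | nil => simp [pvHits]
  | cons e l ih =>
    have hle := pvHits_le k l
    simp only [pvHits, List.map_cons, List.sum_cons, List.length_cons, List.mem_cons] at *
    constructor
    · intro h
      by_cases hk : k ∈ e
      · simp [hk] at h
        have := ih.mp (by omega)
        intro x hx; rcases hx with rfl | hx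
        · exact hk
        · exact this x hx
      · simp [hk] at h; omega
    · intro h
      have hk : k ∈ e := h e (Or.inl rfl)
      simp [hk, ih.mpr (fun x hx => h x (Or.inr hx))]
      omega

theorem count_ofList (k : String) (e : List String) :
    (PySem.Set.ofList e).count k = if k ∈ e then 1 else 0 := by
  by_cases hk : k ∈ e
  · simp only [hk, if_true]
    exact List.count_eq_one_of_mem (PySem.Set.nodup_ofList e) ((PySem.Set.mem_ofList e k).mpr hk)
  · simp [List.count_eq_zero, PySem.Set.mem_ofList, hk]

theorem count_flatten_map_ofList (k : String) (exts : List (List String)) :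
    ((exts.map (fun e => PySem.Set.ofList e)).flatten).count k = pvHits k exts := by
  rw [List.count_flatten]
  simp only [List.map_map, pvHits]
  congr 1
  apply List.map_congr_left
  intro e _
  exact count_ofList k e

theorem update_ofList_right (s : PySem.Set String) (e : List String) :
    PySem.Set.update s (PySem.Set.ofList e) = PySem.Set.update s e := by
  rw [PySem.Set.update_eq_append_filter, PySem.Set.update_eq_append_filter, PySem.Set.ofList_ofList]

theorem update_flatten_map (l : List (List String)) :
    ∀ (s : PySem.Set String),
      PySem.Set.update s ((l.map (fun e => PySem.Set.ofList e)).flatten)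
        = PySem.Set.update s l.flatten := by
  induction l with
  | nil => intro s; rfl
  | cons e t ih =>
    intro s
    simp only [List.map_cons, List.flatten_cons]
    rw [PySem.Set.update_append, PySem.Set.update_append, update_ofList_right, ih]

theorem ofList_flatten_map (exts : List (List String)) :
    PySem.Set.ofList ((exts.map (fun e => PySem.Set.ofList e)).flatten)
      = PySem.Set.ofList exts.flatten := by
  induction exts with
  | nil => rfl
  | cons e l ih =>
    simp only [List.map_cons, List.flatten_cons]
    rw [PySem.Set.ofList_append, PySem.Set.ofList_append, PySem.Set.ofList_ofList,
        update_flatten_map]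

theorem foldl_inter_eq_filter (rest : List (List String)) (s : PySem.Set String) :
    rest.foldl (fun common ext => PySem.Set.inter common ext) s
      = s.filter (fun a => rest.all (fun t => PySem.Set.contains t a)) := by
  induction rest generalizing s with
  | nil => simp
  | cons t l ih =>
    rw [List.foldl_cons, ih]
    show List.filter _ (PySem.Set.inter s t) = _
    simp only [PySem.Set.inter, List.filter_filter, List.all_cons]
    apply List.filter_congr
    intro x _
    simp [Bool.and_comm]

theorem counts_eq_counter (exts : List (List String)) :
    exts.foldl (fun d ext => (PySem.Set.ofList ext).foldl (fun d a => d.insert a (d.getD a 0 + 1)) d) PySem.Dict.empty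
      = PySem.Dict.counter ((exts.map (fun e => PySem.Set.ofList e)).flatten) := by
  rw [← PySem.Dict.foldl_insert_getD_add_one_eq_counter, List.foldl_flatten, List.foldl_map]

theorem foldl_update_eq (exts : List (List String)) :
    ∀ (s : PySem.Set String),
      exts.foldl (fun m e => PySem.Set.update m e) s = PySem.Set.update s exts.flatten := by
  induction exts with
  | nil => intro s; rfl
  | cons e t ih =>
    intro s
    rw [List.foldl_cons, ih, List.flatten_cons, PySem.Set.update_append]

theorem get_accepted_assumptions_spec : Claim_equal_get_accepted_assumptions := by
  intro exts strat _ hpre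
  unfold Spec_get_accepted_assumptions
  cases exts with
  | nil => simp [get_accepted_assumptions, get_accepted_assumptions_alt]
  | cons e0 rest =>
    rcases hpre with h | h | h
    · exact absurd h (by simp)
    · -- Skeptical
      subst h
      have hne : ¬ (e0 :: rest = ([] : List (List String))) := by simp
      simp only [get_accepted_assumptions, get_accepted_assumptions_alt, if_neg hne,
        beq_self_eq_true, if_true, Bool.true_or, Bool.not_true, Bool.false_eq_true, if_false]
      rw [counts_eq_counter, foldl_inter_eq_filter]
      rw [PySem.Dict.items_counter, List.filter_map, List.map_map]
      simp only [Function.comp_def]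
      set L := (((e0 :: rest).map (fun e => PySem.Set.ofList e)).flatten) with hL
      have hsplit : PySem.Set.ofList L
          = PySem.Set.ofList e0
            ++ (PySem.Set.ofList ((rest.map (fun e => PySem.Set.ofList e)).flatten)).filter
                (fun y => !(PySem.Set.contains (PySem.Set.ofList e0) y)) := by
        rw [hL]
        simp only [List.map_cons, List.flatten_cons]
        rw [PySem.Set.ofList_append, PySem.Set.ofList_ofList, PySem.Set.update_eq_append_filter]
      rw [hsplit, List.filter_append]
      have hcount : ∀ k, L.count k = pvHits k (e0 :: rest) := fun k => count_flatten_map_ofList k _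
      have h2 : (List.filter (fun p => ((L.count p : Int) == ((e0 :: rest).length : Int)))
          ((PySem.Set.ofList ((rest.map (fun e => PySem.Set.ofList e)).flatten)).filter
            (fun y => !(PySem.Set.contains (PySem.Set.ofList e0) y)))) = [] := by
        rw [List.filter_eq_nil_iff]
        intro y hy
        have hy2 := List.of_mem_filter hy
        rw [Bool.not_eq_eq_eq_not, Bool.not_true] at hy2
        have hnot : y ∉ e0 := by
          intro hmem
          have hcon := (PySem.Set.contains_iff (PySem.Set.ofList e0) y).mpr
            ((PySem.Set.mem_ofList e0 y).mpr hmem)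
          rw [hcon] at hy2
          exact absurd hy2 (by simp)
        have hub : pvHits y (e0 :: rest) ≤ rest.length := by
          have := pvHits_le y rest
          simp only [pvHits, List.map_cons, List.sum_cons, hnot, if_false] at *
          omega
        rw [hcount y]
        simp only [beq_iff_eq]
        intro hc
        have : pvHits y (e0 :: rest) = (e0 :: rest).length := by exact_mod_cast hc
        simp only [List.length_cons] at this
        omega
      rw [h2, List.append_nil]
      have hfc : List.filter (fun p => ((L.count p : Int) == ((e0 :: rest).length : Int)))
            (PySem.Set.ofList e0)
          = List.filter (fun a => rest.all (fun t => PySem.Set.contains t a))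
            (PySem.Set.ofList e0) := by
        apply List.filter_congr
        intro k hk
        have hke0 : k ∈ e0 := (PySem.Set.mem_ofList e0 k).mp hk
        rw [hcount k]
        have hsplit2 : pvHits k (e0 :: rest) = 1 + pvHits k rest := by
          simp [pvHits, hke0]
        by_cases hall : ∀ t ∈ rest, k ∈ t
        · have heq := (pvHits_eq_length_iff k rest).mpr hall
          have hA : rest.all (fun t => PySem.Set.contains t k) = true := by
            rw [List.all_eq_true]
            intro t ht
            exact (PySem.Set.contains_iff t k).mpr (hall t ht)
          rw [hA, beq_iff_eq]
          simp only [List.length_cons]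
          push_cast
          omega
        · have hne2 : pvHits k rest ≠ rest.length := fun hc => hall ((pvHits_eq_length_iff k rest).mp hc)
          have hA : rest.all (fun t => PySem.Set.contains t k) = false := by
            rw [Bool.eq_false_iff]
            intro hc
            exact hall (fun t ht => (PySem.Set.contains_iff t k).mp ((List.all_eq_true.mp hc) t ht))
          rw [hA, beq_eq_false_iff_ne]
          intro hc
          have hcast : pvHits k (e0 :: rest) = (e0 :: rest).length := by exact_mod_cast hc
          have hlt := pvHits_le k rest
          simp only [List.length_cons] at hcast
          omega
      rw [hfc]
      exact (List.map_id _).symm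
    · -- Credulous
      subst h
      have hne : ¬ (e0 :: rest = ([] : List (List String))) := by simp
      have hcs : ("Credulous" == "Skeptical") = false := by decide
      simp only [get_accepted_assumptions, get_accepted_assumptions_alt, if_neg hne,
        hcs, beq_self_eq_true, Bool.or_true, Bool.not_true,
        Bool.false_eq_true, if_false]
      rw [counts_eq_counter, PySem.Dict.keys_counter, ofList_flatten_map, foldl_update_eq]
      rfl
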